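-- pv_equiv track=rewrite | github.com/eolandro/IA2025 | añil/U3/come_solo/eat_alone.py | generate_numbered_board
-- ===== SOURCE A (Python) =====
-- def generate_numbered_board(size):
--     board = []
--     counter = 1
--     for i in range(size):
--         row = []
--         for j in range(i + 1):
--             row.append(str(counter).zfill(2))
--             counter += 1
--         board.append(row)
--     return board
-- ===== SOURCE B (Python) =====
-- def generate_numbered_board(size):
--     return [
--         [str(k).zfill(2) for k in range(i * (i + 1) // 2 + 1, (i + 1) * (i + 2) // 2 + 1)]
--         for i in range(size)
--     ]
-- ===== Notes on version B (the rewrite author's own statement) =====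
-- stated objective: simpler
-- what changed: Replaced the interleaved nested-loop counter accumulator by a single comprehension in which each row's numbers come from a closed-form triangular-number range, eliminating the mutable counter and both accumulator loops.
import Mathlib
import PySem

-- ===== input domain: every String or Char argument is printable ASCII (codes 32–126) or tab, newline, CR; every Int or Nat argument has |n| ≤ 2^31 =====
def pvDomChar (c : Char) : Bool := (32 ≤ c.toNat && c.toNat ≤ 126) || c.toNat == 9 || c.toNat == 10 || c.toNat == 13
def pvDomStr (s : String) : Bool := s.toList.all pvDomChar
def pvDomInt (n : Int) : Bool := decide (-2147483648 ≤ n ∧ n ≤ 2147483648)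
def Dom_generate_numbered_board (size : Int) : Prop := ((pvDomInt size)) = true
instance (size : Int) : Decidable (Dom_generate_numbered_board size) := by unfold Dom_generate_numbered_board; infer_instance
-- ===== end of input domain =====

-- B replaces A's interleaved counter accumulator by closed-form per-row number ranges (objective: simpler).

-- ===== PORT A =====
def generate_numbered_board (size : Int) : List (List String) :=
  let st :=
    (PySem.List.pyRange 0 size 1).foldl
      (fun (st : List (List String) × Int) i =>
        let inner :=
          (PySem.List.pyRange 0 (i + 1) 1).foldl
            (fun (rc : List String × Int) _j =>
              (rc.1 ++ [PySem.Str.zfill (PySem.Int.toStr rc.2) 2], rc.2 + 1))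
            ([], st.2)
        (st.1 ++ [inner.1], inner.2))
      ([], 1)
  st.1

-- ===== PORT B =====
def generate_numbered_board_alt (size : Int) : List (List String) :=
  (PySem.List.pyRange 0 size 1).map (fun i =>
    (PySem.List.pyRange (PySem.Int.floordiv (i * (i + 1)) 2 + 1)
        (PySem.Int.floordiv ((i + 1) * (i + 2)) 2 + 1) 1).map
      (fun k => PySem.Str.zfill (PySem.Int.toStr k) 2))

-- ===== PRECONDITION & SPEC =====
def Spec_generate_numbered_board (size : Int) (out : List (List String)) : Prop := out = generate_numbered_board_alt size
instance (size : Int) (out : List (List String)) : Decidable (Spec_generate_numbered_board size out) := by unfold Spec_generate_numbered_board; infer_instance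

-- ===== CLAIM (what is proved, stated in full; the proofs are below) =====
def Claim_equal_generate_numbered_board : Prop := ∀ (size : Int), Dom_generate_numbered_board size → Spec_generate_numbered_board size (generate_numbered_board size)

-- ===== LEMMAS AND PROOFS =====

-- triangular numbers
def pvTri (k : Nat) : Nat := k * (k + 1) / 2

-- the k-th closed-form row (proof-side reference value)
def pvRow (k : Nat) : List String :=
  (List.range (k + 1)).map
    (fun (j : Nat) => PySem.Str.zfill (PySem.Int.toStr ((pvTri k : Int) + 1 + (j : Int))) 2)

theorem pvTri_succ (k : Nat) : pvTri (k + 1) = pvTri k + (k + 1) := by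
  unfold pvTri
  have h : 2 ∣ k * (k + 1) := (Nat.even_mul_succ_self k).two_dvd
  have e : (k + 1) * (k + 1 + 1) = k * (k + 1) + 2 * (k + 1) := by ring
  omega

theorem pvTri_cast (k : Nat) :
    PySem.Int.floordiv ((k : Int) * ((k : Int) + 1)) 2 = (pvTri k : Int) := by
  have h : ((k : Int) * ((k : Int) + 1)) = ((k * (k + 1) : Nat) : Int) := by push_cast; ring
  rw [h]
  exact_mod_cast PySem.Int.floordiv_natCast (k * (k + 1)) 2

-- inner loop: appends the zero-filled numbers c, c+1, … and advances the counter
theorem pv_inner (l : List Int) (row : List String) (c : Int) :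
    l.foldl (fun (rc : List String × Int) _j =>
        (rc.1 ++ [PySem.Str.zfill (PySem.Int.toStr rc.2) 2], rc.2 + 1)) (row, c)
      = (row ++ (List.range l.length).map
            (fun (j : Nat) => PySem.Str.zfill (PySem.Int.toStr (c + (j : Int))) 2),
         c + l.length) := by
  induction l generalizing row c with
  | nil => simp
  | cons x xs ih =>
      simp only [List.foldl_cons, ih, List.length_cons, Prod.mk.injEq]
      refine ⟨?_, by push_cast; ring⟩
      rw [List.range_succ_eq_map, List.map_cons, List.map_map]
      simp only [Nat.cast_zero, add_zero, List.append_assoc, List.singleton_append]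
      congr 1
      congr 1
      apply List.map_congr_left
      intro j _
      simp only [Function.comp]
      congr 2
      push_cast; ring

-- B's row at i = k is the k-th closed-form row
theorem pv_rowB (k : Nat) :
    (PySem.List.pyRange (PySem.Int.floordiv ((k : Int) * ((k : Int) + 1)) 2 + 1)
        (PySem.Int.floordiv (((k : Int) + 1) * ((k : Int) + 2)) 2 + 1) 1).map
      (fun kk => PySem.Str.zfill (PySem.Int.toStr kk) 2)
      = pvRow k := by
  have h1 : ((k : Int) + 1) * ((k : Int) + 2)
      = ((k + 1 : Nat) : Int) * (((k + 1 : Nat) : Int) + 1) := by push_cast; ring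
  rw [h1, pvTri_cast, pvTri_cast, PySem.List.pyRange_one]
  have hlen : ((pvTri (k + 1) : Int) + 1 - ((pvTri k : Int) + 1)).toNat = k + 1 := by
    have := pvTri_succ k; omega
  rw [hlen, List.map_map]
  unfold pvRow
  apply List.map_congr_left
  intro j _
  simp [Function.comp]

-- outer loop invariant: board so far = closed-form rows, counter = tri + 1
theorem pv_outer (n : Nat) :
    (PySem.List.pyRange 0 (n : Int) 1).foldl
      (fun (st : List (List String) × Int) i =>
        let inner :=
          (PySem.List.pyRange 0 (i + 1) 1).foldl
            (fun (rc : List String × Int) _j =>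
              (rc.1 ++ [PySem.Str.zfill (PySem.Int.toStr rc.2) 2], rc.2 + 1))
            ([], st.2)
        (st.1 ++ [inner.1], inner.2))
      ([], 1)
    = ((List.range n).map pvRow, (pvTri n : Int) + 1) := by
  induction n with
  | zero => simp [pvTri]
  | succ m ih =>
      have hsplit : PySem.List.pyRange 0 ((m + 1 : Nat) : Int) 1
          = PySem.List.pyRange 0 (m : Int) 1 ++ [(m : Int)] := by
        have : ((m + 1 : Nat) : Int) = (m : Int) + 1 := by push_cast; ring
        rw [this]
        exact PySem.List.pyRange_one_succ_right (by positivity)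
      rw [hsplit, List.foldl_append, ih]
      simp only [List.foldl_cons, List.foldl_nil]
      rw [pv_inner]
      have hlen : (PySem.List.pyRange 0 ((m : Int) + 1) 1).length = m + 1 := by
        rw [PySem.List.length_pyRange_one]; omega
      rw [hlen, List.range_succ, List.map_append]
      simp only [Prod.mk.injEq, List.map_cons, List.map_nil]
      constructor
      · simp [pvRow, List.range_succ]
      · have := pvTri_succ m; push_cast [this]; ring

-- ===== VERDICT (by name: the statement is the Claim_ definition above) =====
theorem generate_numbered_board_spec : Claim_equal_generate_numbered_board := by
  intro size _
  unfold Spec_generate_numbered_board generate_numbered_board generate_numbered_board_alt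
  have hsz : PySem.List.pyRange 0 size 1 = PySem.List.pyRange 0 ((size.toNat : Nat) : Int) 1 := by
    by_cases h : size ≤ 0
    · rw [PySem.List.pyRange_one_eq_nil h, PySem.List.pyRange_one_eq_nil (by omega)]
    · congr 1; omega
  rw [hsz, pv_outer]
  rw [PySem.List.pyRange_one]
  simp only [Int.sub_zero, Int.toNat_natCast, List.map_map]
  apply List.map_congr_left
  intro k _
  simp only [Function.comp, zero_add]
  exact (pv_rowB k).symm
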